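-- pv_equiv track=rewrite | github.com/antoniojsp/retos | leetcode/python/two_char.py | is_valid_after_delete
-- ===== SOURCE A (Python) =====
-- def check_valid_string(string:list)->bool:
--     """
--     string valid if none repeat consecutively
--     """
--     for i in range(0,len(string)-1):
--         if string[i] == string[i+1]:
--             return False
--     return True
--
-- def is_valid_after_delete(word:str, char_list:tuple) -> int:
--     """
--     testing.js if when the chars are delete, they form a valid string. Return its length
--     """
--     result = list(word)
--     i = 0
--     while i < len(result):
--         if result[i] in char_list:
--             del result[i]
--         else:
--             i +=1
--
--     valid = check_valid_string(result)
--
--     return len(result) if valid else 0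
-- ===== SOURCE B (Python) =====
-- def is_valid_after_delete(word: str, char_list: tuple) -> int:
--     """
--     Single pass: skip deleted chars, track last kept char and a running count;
--     return 0 as soon as two consecutive kept chars are equal.
--     """
--     prev = None
--     count = 0
--     for c in word:
--         if c in char_list:
--             continue
--         if c == prev:
--             return 0
--         prev = c
--         count += 1
--     return count
-- ===== Notes on version B (the rewrite author's own statement) =====
-- stated objective: faster
-- what changed: Replaces the materialized list with in-place while-loop deletion plus a separate index-based duplicate rescan by a single pass over the string keeping only scalar state (last kept char, count) with an early return 0 on the first adjacent duplicate.
import Mathlib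
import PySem

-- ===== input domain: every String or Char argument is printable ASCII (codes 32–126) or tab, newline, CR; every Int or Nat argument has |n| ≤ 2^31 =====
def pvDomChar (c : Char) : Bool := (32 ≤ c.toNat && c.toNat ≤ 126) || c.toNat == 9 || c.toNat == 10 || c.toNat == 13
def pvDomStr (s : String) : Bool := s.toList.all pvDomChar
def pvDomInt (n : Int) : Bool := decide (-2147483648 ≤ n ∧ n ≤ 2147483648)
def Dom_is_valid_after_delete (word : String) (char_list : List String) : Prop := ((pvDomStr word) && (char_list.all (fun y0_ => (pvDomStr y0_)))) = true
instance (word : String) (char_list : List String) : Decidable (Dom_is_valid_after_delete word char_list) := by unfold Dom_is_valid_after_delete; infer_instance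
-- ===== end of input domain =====

-- B replaces A's materialize-filter-then-rescan with a single pass keeping only scalar state (last kept char, count); same values everywhere.


-- ===== PORT A =====
-- the `while i < len(result): if result[i] in char_list: del result[i] else: i += 1` loop
def pvDelLoop (char_list : List String) (result : List Char) (i : Nat) : List Char :=
  if h : i < result.length then
    if char_list.contains (String.singleton result[i]) then
      pvDelLoop char_list (result.eraseIdx i) i
    else
      pvDelLoop char_list result (i + 1)
  else result
termination_by result.length - i
decreasing_by
  · simp [List.length_eraseIdx, h]; omega
  · omega

-- `for i in range(0, len(string)-1): if string[i] == string[i+1]: return False; return True`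
def pvCheckGo (s : List Char) (i : Nat) : Bool :=
  if h : i + 1 < s.length then
    if s[i]'(by omega) = s[i + 1]'h then false
    else pvCheckGo s (i + 1)
  else true
termination_by s.length - i

def is_valid_after_delete (word : String) (char_list : List String) : Int :=
  let result := pvDelLoop char_list word.toList 0
  let valid := pvCheckGo result 0
  if valid then (result.length : Int) else 0

-- ===== PORT B =====
-- single pass with prev (last kept char) and count; early return 0 on adjacent duplicate
def pvOnePass (char_list : List String) : List Char → Option Char → Int → Int
  | [], _, count => count
  | c :: rest, prev, count =>
    if char_list.contains (String.singleton c) then pvOnePass char_list rest prev count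
    else if prev = some c then 0
    else pvOnePass char_list rest (some c) (count + 1)

def is_valid_after_delete_alt (word : String) (char_list : List String) : Int :=
  pvOnePass char_list word.toList none 0

-- ===== PRECONDITION & SPEC =====
def Spec_is_valid_after_delete (word : String) (char_list : List String) (out : Int) : Prop := out = is_valid_after_delete_alt word char_list
instance (word : String) (char_list : List String) (out : Int) : Decidable (Spec_is_valid_after_delete word char_list out) := by unfold Spec_is_valid_after_delete; infer_instance

-- ===== CLAIM (what is proved, stated in full; the proofs are below) =====
def Claim_equal_is_valid_after_delete : Prop := ∀ (word : String) (char_list : List String), Dom_is_valid_after_delete word char_list → Spec_is_valid_after_delete word char_list (is_valid_after_delete word char_list)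

-- ===== LEMMAS AND PROOFS =====

def pvKeep (char_list : List String) (c : Char) : Bool :=
  ! char_list.contains (String.singleton c)

def pvChainOK : List Char → Bool
  | a :: b :: t => if a = b then false else pvChainOK (b :: t)
  | _ => true

def pvOkFrom : Option Char → List Char → Bool
  | _, [] => true
  | prev, c :: t => if prev = some c then false else pvOkFrom (some c) t

theorem pvDelLoop_eq (char_list : List String) (l : List Char) (i : Nat) :
    pvDelLoop char_list l i = l.take i ++ (l.drop i).filter (pvKeep char_list) := by
  fun_induction pvDelLoop char_list l i with
  | case1 l i h hmem ih =>
      rw [ih]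
      rw [List.eraseIdx_eq_take_drop_succ]
      rw [List.take_append_of_le_length (by simp [Nat.le_of_lt h]),
          List.take_take, Nat.min_self]
      have hdrop : (l.take i ++ l.drop (i + 1)).drop i = l.drop (i + 1) := by
        rw [List.drop_append_of_le_length (by simp [Nat.le_of_lt h])]
        simp
      rw [hdrop]
      have : l.drop i = l[i] :: l.drop (i + 1) := List.drop_eq_getElem_cons h
      have hm : String.singleton l[i] ∈ char_list := by
        simpa [List.contains_eq_mem] using hmem
      rw [this, List.filter_cons]
      simp [pvKeep, hm]
  | case2 l i h hmem ih =>
      rw [ih]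
      have hd : l.drop i = l[i] :: l.drop (i + 1) := List.drop_eq_getElem_cons h
      have ht : l.take (i + 1) = l.take i ++ [l[i]] := by
        rw [List.take_add_one, List.getElem?_eq_getElem h]; rfl
      have hm : String.singleton l[i] ∉ char_list := by
        simpa [List.contains_eq_mem] using hmem
      have hk : pvKeep char_list l[i] = true := by simp [pvKeep, hm]
      rw [ht, hd, List.filter_cons, if_pos hk, List.append_assoc]
      rfl
  | case3 l i h =>
      have : l.length ≤ i := Nat.le_of_not_lt h
      simp [List.take_of_length_le this, List.drop_of_length_le this]

theorem pvCheckGo_eq (s : List Char) (i : Nat) :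
    pvCheckGo s i = pvChainOK (s.drop i) := by
  fun_induction pvCheckGo s i with
  | case1 i h heq =>
      have h1 : i < s.length := by omega
      rw [List.drop_eq_getElem_cons h1, List.drop_eq_getElem_cons h]
      simp [pvChainOK, heq]
  | case2 i h heq ih =>
      rw [ih]
      have h1 : i < s.length := by omega
      conv_rhs => rw [List.drop_eq_getElem_cons h1, List.drop_eq_getElem_cons h]
      simp [pvChainOK, heq]
  | case3 i h =>
      match hd : s.drop i with
      | [] => simp [pvChainOK]
      | [a] => simp [pvChainOK]
      | a :: b :: t =>
        exfalso
        have := congrArg List.length hd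
        simp [List.length_drop] at this
        omega

theorem pvOkFrom_some (a : Char) (l : List Char) :
    pvOkFrom (some a) l = pvChainOK (a :: l) := by
  induction l generalizing a with
  | nil => simp [pvOkFrom, pvChainOK]
  | cons b t ih => simp [pvOkFrom, pvChainOK, ih]

theorem pvOkFrom_none (l : List Char) : pvOkFrom none l = pvChainOK l := by
  match l with
  | [] => rfl
  | a :: t => simp [pvOkFrom, pvOkFrom_some]

theorem pvOnePass_eq (char_list : List String) (l : List Char) (prev : Option Char) (count : Int) :
    pvOnePass char_list l prev count =
      if pvOkFrom prev (l.filter (pvKeep char_list)) then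
        count + ((l.filter (pvKeep char_list)).length : Int)
      else 0 := by
  induction l generalizing prev count with
  | nil => simp [pvOnePass, pvOkFrom]
  | cons c t ih =>
      by_cases hmem : String.singleton c ∈ char_list
      · have hc : char_list.contains (String.singleton c) = true := by
          simpa [List.contains_eq_mem] using hmem
        simp only [pvOnePass, hc, if_true]
        rw [ih, List.filter_cons]
        simp [pvKeep, hmem]
      · have hc : char_list.contains (String.singleton c) = false := by
          simpa [List.contains_eq_mem] using hmem
        simp only [pvOnePass, hc, List.filter_cons, pvKeep, Bool.not_false,
          if_true, Bool.false_eq_true, if_false]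
        by_cases hp : prev = some c
        · simp [pvOkFrom, hp]
        · rw [ih]
          simp only [pvOkFrom, if_neg hp]
          split
          · push_cast [List.length_cons]; ring
          · rfl

theorem is_valid_after_delete_eq_alt (word : String) (char_list : List String) :
    is_valid_after_delete word char_list = is_valid_after_delete_alt word char_list := by
  unfold is_valid_after_delete is_valid_after_delete_alt
  simp only [pvDelLoop_eq, pvCheckGo_eq, pvOnePass_eq, pvOkFrom_none,
    List.take_zero, List.drop_zero, List.nil_append]
  split <;> simp

-- ===== VERDICT (by name: the statement is the Claim_ definition above) =====
theorem is_valid_after_delete_spec : Claim_equal_is_valid_after_delete := by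
  intro word char_list _
  exact is_valid_after_delete_eq_alt word char_list
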